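-- pv_equiv track=rewrite | github.com/SirMathhman/Tuff | scripts/precommit.py | analyze_duplication
-- ===== SOURCE A (Python) =====
-- def analyze_duplication(output):
--     lines = output.split("\n")
--     in_duplication_block = False
--     duplication_samples = []
--     current_sample = []
--
--     for line in lines:
--         if "duplication in the following files" in line:
--             in_duplication_block = True
--             current_sample = [line]
--         elif in_duplication_block:
--             if line.strip() == "" or "======" in line:
--                 if current_sample:
--                     duplication_samples.append("\n".join(current_sample))
--                 current_sample = []
--                 in_duplication_block = False
--             else:
--                 current_sample.append(line)
--
--     if current_sample:
--         duplication_samples.append("\n".join(current_sample))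
--
--     return duplication_samples
-- ===== SOURCE B (Python) =====
-- def analyze_duplication(output):
--     MARK = "duplication in the following files"
--     lines = output.split("\n")
--     # stage 1: find every marker line, then slice the lines into marker-anchored segments
--     marks = [i for i, l in enumerate(lines) if MARK in l]
--     segments = [lines[a:b] for a, b in zip(marks, marks[1:] + [len(lines)])]
--     # stage 2: trim each segment at its first terminator; an untrimmed segment
--     # survives only if it is the last one (no later marker discarded it)
--     samples = []
--     for k, seg in enumerate(segments):
--         cut = next((j for j, l in enumerate(seg)
--                     if j > 0 and (l.strip() == "" or "======" in l)), None)
--         if cut is not None: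
--             samples.append("\n".join(seg[:cut]))
--         elif k == len(segments) - 1:
--             samples.append("\n".join(seg))
--     return samples
-- ===== Notes on version B (the rewrite author's own statement) =====
-- stated objective: alternative
-- what changed: Replaced A's online flag-based state machine with two staged passes over an intermediate data structure: first slice the lines into marker-anchored segments (marker-index list + zip + slices), then trim each segment at its first terminator, keeping an untrimmed segment only when it is the last.
import Mathlib
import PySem

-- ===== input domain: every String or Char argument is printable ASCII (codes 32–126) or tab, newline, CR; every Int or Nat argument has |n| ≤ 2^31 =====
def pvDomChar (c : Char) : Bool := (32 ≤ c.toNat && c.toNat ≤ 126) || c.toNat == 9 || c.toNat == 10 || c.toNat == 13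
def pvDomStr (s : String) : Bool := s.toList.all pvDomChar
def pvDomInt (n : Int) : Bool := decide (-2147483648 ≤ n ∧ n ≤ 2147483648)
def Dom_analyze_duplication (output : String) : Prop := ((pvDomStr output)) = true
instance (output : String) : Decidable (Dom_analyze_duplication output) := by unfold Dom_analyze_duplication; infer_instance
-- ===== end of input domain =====

-- B replaces A's online flag-based state machine with two staged passes over an intermediate
-- structure: slice the lines into marker-anchored segments (marker indices + zip + slices), then
-- trim each segment at its first terminator, keeping an untrimmed one only if last; objective: alternative.

-- shared tiny predicates (the literal membership/strip tests both Pythons perform)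
def advIsMark (line : String) : Bool := PySem.Str.isIn "duplication in the following files" line
def advIsTerm (line : String) : Bool := (PySem.Str.strip line == "") || PySem.Str.isIn "======" line

-- ===== PORT A =====
-- state = (in_duplication_block, duplication_samples, current_sample)
def advStepA (st : Bool × List String × List String) (line : String) : Bool × List String × List String :=
  if advIsMark line then (true, st.2.1, [line])
  else if st.1 then
    (if advIsTerm line then
      (false, (if st.2.2 ≠ [] then st.2.1 ++ [PySem.Str.join "\n" st.2.2] else st.2.1), [])
    else (true, st.2.1, st.2.2 ++ [line]))
  else st

def analyze_duplication (output : String) : List String :=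
  let lines := (PySem.Str.split? output "\n").getD []   -- sep "\n" ≠ "": split? is some here
  let st := lines.foldl advStepA (false, [], [])
  if st.2.2 ≠ [] then st.2.1 ++ [PySem.Str.join "\n" st.2.2] else st.2.1

-- ===== PORT B =====
-- stage 1: marker indices, then marker-anchored segments by slicing
def advSegments (lines : List String) : List (List String) :=
  let marks : List Int :=
    (PySem.List.enumerate lines).filterMap (fun p => if advIsMark p.2 then some p.1 else none)
  (marks.zip (marks.drop 1 ++ [(lines.length : Int)])).map
    (fun ab => PySem.List.slice lines (some ab.1) (some ab.2))

-- stage 2: trim each segment at its first terminator; untrimmed survives only if last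
def advCollect (segments : List (List String)) : List String :=
  (PySem.List.enumerate segments).foldl (fun samples ks =>
    match (PySem.List.enumerate ks.2).find? (fun jl => decide (0 < jl.1) && advIsTerm jl.2) with
    | some jl => samples ++ [PySem.Str.join "\n" (PySem.List.slice ks.2 none (some jl.1))]
    | none =>
        if ks.1 = (segments.length : Int) - 1 then samples ++ [PySem.Str.join "\n" ks.2]
        else samples) []

def analyze_duplication_alt (output : String) : List String :=
  let lines := (PySem.Str.split? output "\n").getD []
  advCollect (advSegments lines)

-- ===== PRECONDITION & SPEC =====
def Spec_analyze_duplication (output : String) (out : List String) : Prop := out = analyze_duplication_alt output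
instance (output : String) (out : List String) : Decidable (Spec_analyze_duplication output out) := by unfold Spec_analyze_duplication; infer_instance

-- ===== CLAIM (what is proved, stated in full; the proofs are below) =====
def Claim_equal_analyze_duplication : Prop := ∀ (output : String), Dom_analyze_duplication output → Spec_analyze_duplication output (analyze_duplication output)

-- ===== LEMMAS AND PROOFS =====

def advNotMark (l : String) : Bool := !advIsMark l
def advNotTerm (l : String) : Bool := !advIsTerm l

-- structural middle spec: marker-anchored segments of the line list
def segsOf : List String → List (List String)
  | [] => []
  | l :: ls =>
    if advIsMark l then (l :: ls.takeWhile advNotMark) :: segsOf (ls.dropWhile advNotMark)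
    else segsOf ls
termination_by ls => ls.length
decreasing_by
  · exact Nat.lt_succ_of_le (List.length_dropWhile_le _ _)
  · exact Nat.lt_succ_of_le (Nat.le_refl _)

-- trim a segment at its first terminator after the head (none = no terminator)
def advTrim? (seg : List String) : Option (List String) :=
  match seg with
  | [] => none
  | h :: body =>
      if body.dropWhile advNotTerm ≠ [] then some (h :: body.takeWhile advNotTerm) else none

-- structural middle spec for stage 2
def emitSegs : List (List String) → List String
  | [] => []
  | [seg] => [PySem.Str.join "\n" ((advTrim? seg).getD seg)]
  | seg :: s2 :: rest =>
      (match advTrim? seg with | some t => [PySem.Str.join "\n" t] | none => []) ++ emitSegs (s2 :: rest)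

-- A-side recursion (proof device; A's fold computes it)
mutual
def advScan : List String → List String
  | [] => []
  | l :: ls => if advIsMark l then advBlock [l] ls else advScan ls
def advBlock (block : List String) : List String → List String
  | [] => [PySem.Str.join "\n" block]
  | l :: ls =>
    if advIsMark l then advBlock [l] ls
    else if advIsTerm l then PySem.Str.join "\n" block :: advScan ls
    else advBlock (block ++ [l]) ls
end

def advFin (st : Bool × List String × List String) : List String :=
  if st.2.2 ≠ [] then st.2.1 ++ [PySem.Str.join "\n" st.2.2] else st.2.1

-- A's fold from the scanning state computes advScan; from an in-block state, advBlock
theorem adv_key (ls : List String) :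
    (∀ s, advFin (ls.foldl advStepA (false, s, [])) = s ++ advScan ls) ∧
    (∀ s c, c ≠ [] → advFin (ls.foldl advStepA (true, s, c)) = s ++ advBlock c ls) := by
  induction ls with
  | nil =>
    refine ⟨fun s => by simp [advFin, advScan], fun s c hc => by simp [advFin, advBlock, hc]⟩
  | cons l ls ih =>
    constructor
    · intro s
      by_cases hm : advIsMark l
      · simp only [List.foldl_cons, advStepA, hm, if_pos, advScan]
        simpa [hm] using ih.2 s [l] (by simp)
      · simp only [List.foldl_cons, advStepA, hm, advScan, Bool.false_eq_true, if_false]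
        simpa [hm] using ih.1 s
    · intro s c hc
      by_cases hm : advIsMark l
      · simp only [List.foldl_cons, advStepA, hm, if_pos, advBlock]
        simpa [hm] using ih.2 s [l] (by simp)
      · by_cases ht : advIsTerm l
        · simp only [List.foldl_cons, advStepA, hm, ht, advBlock, Bool.false_eq_true,
            if_false, hc, ne_eq, not_false_iff, if_pos]
          rw [ih.1 (s ++ [PySem.Str.join "\n" c])]
          simp
        · simp only [List.foldl_cons, advStepA, hm, ht, advBlock, Bool.false_eq_true,
            if_false, if_true]
          have := ih.2 s (c ++ [l]) (by simp)
          simp only at this ⊢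
          exact this

def marksN : List String → List Nat
  | [] => []
  | l :: ls => (if advIsMark l then [0] else []) ++ (marksN ls).map (· + 1)

def pairSeg (ls : List String) (ab : Nat × Nat) : List String := (ls.drop ab.1).take (ab.2 - ab.1)

def pairsToSegs (ls : List String) (m : List Nat) : List (List String) :=
  (m.zip (m.drop 1 ++ [ls.length])).map (pairSeg ls)

theorem marks_enum (ls : List String) : ∀ s : Int,
    (PySem.List.enumerate ls s).filterMap (fun p => if advIsMark p.2 then some p.1 else none)
      = List.map (fun (k : Nat) => (k : Int) + s) (marksN ls) := by
  induction ls with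
  | nil => intro s; simp [marksN, PySem.List.enumerate_nil]
  | cons l ls ih =>
    intro s
    have tail : List.map (fun (k : Nat) => (k:Int) + (s+1)) (marksN ls)
        = List.map (fun (k : Nat) => (k:Int) + s) ((marksN ls).map (· + 1)) := by
      rw [List.map_map]; apply List.map_congr_left; intro k _
      simp only [Function.comp_apply]; push_cast; ring
    rw [PySem.List.enumerate_cons, List.filterMap_cons, ih (s+1), tail]
    by_cases hm : advIsMark l
    · simp only [hm, marksN, if_pos, List.singleton_append, List.map_cons, Nat.cast_zero, zero_add]
    · simp only [hm, marksN, Bool.false_eq_true, if_false, if_neg, List.nil_append]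

theorem marksN_nil_iff (ls : List String) :
    marksN ls = [] ↔ ∀ l ∈ ls, advIsMark l = false := by
  induction ls with
  | nil => simp [marksN]
  | cons l ls ih => by_cases hm : advIsMark l <;> simp [marksN, hm, ih]

theorem marksN_head (ls : List String) : ∀ (m1 : Nat) (m' : List Nat), marksN ls = m1 :: m' →
    ls.take m1 = ls.takeWhile advNotMark := by
  induction ls with
  | nil => intro m1 m' h; simp [marksN] at h
  | cons l ls ih =>
    intro m1 m' h
    by_cases hm : advIsMark l
    · simp only [marksN, hm, if_pos, List.singleton_append, List.cons.injEq] at h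
      simp [h.1, List.takeWhile_cons, advNotMark, hm]
    · simp only [marksN, hm, Bool.false_eq_true, if_false, List.nil_append] at h
      rcases List.map_eq_cons_iff.mp h with ⟨a, as, hma, ha, -⟩
      subst ha
      simp only [List.take_succ_cons, List.takeWhile_cons, advNotMark, hm, Bool.not_false, if_pos]
      rw [ih a as hma]

theorem pair_shift (ls : List String) (l : String) (m m2 : List Nat) :
    ((m.map (· + 1)).zip (m2.map (· + 1))).map (pairSeg (l :: ls)) = (m.zip m2).map (pairSeg ls) := by
  rw [List.zip_map, List.map_map]
  apply List.map_congr_left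
  intro ab _
  simp [pairSeg, Prod.map, List.drop_succ_cons, Nat.succ_sub_succ]

theorem segsOf_dropWhile (ls : List String) : segsOf (ls.dropWhile advNotMark) = segsOf ls := by
  induction ls with
  | nil => simp
  | cons l ls ih =>
    by_cases hm : advIsMark l
    · simp [advNotMark, hm]
    · simp only [List.dropWhile_cons, advNotMark, hm, Bool.not_false, if_pos]
      rw [ih]; simp [segsOf, hm]

theorem pairs_eq (ls : List String) : pairsToSegs ls (marksN ls) = segsOf ls := by
  induction ls with
  | nil => simp [pairsToSegs, marksN, segsOf]
  | cons l ls ih =>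
    by_cases hm : advIsMark l
    · rw [segsOf, if_pos hm]
      cases hmk : marksN ls with
      | nil =>
        have hall := (marksN_nil_iff ls).mp hmk
        have htw : ls.takeWhile advNotMark = ls :=
          List.takeWhile_eq_self_iff.mpr (fun x hx => by simp [advNotMark, hall x hx])
        have hdw : ls.dropWhile advNotMark = [] :=
          List.dropWhile_eq_nil_iff.mpr (fun x hx => by simp [advNotMark, hall x hx])
        simp [pairsToSegs, marksN, hm, hmk, pairSeg, htw, hdw, segsOf,
          List.take_of_length_le, Nat.le_succ]
      | cons m1 m' =>
        have hhead : ls.take m1 = ls.takeWhile advNotMark := marksN_head ls m1 m' hmk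
        rw [segsOf_dropWhile]
        rw [← ih]
        simp only [pairsToSegs, marksN, hm, if_pos, List.singleton_append, hmk, List.map_cons,
          List.drop_succ_cons, List.drop_zero, List.map_append, List.zip_cons_cons, List.map_cons]
        simp only [List.cons_append, List.zip_cons_cons, List.map_cons]
        congr 1
        · simp [pairSeg, List.take_succ_cons, hhead]
        · rw [show ((l :: ls).length) = ls.length + 1 from rfl,
            show ([ls.length + 1] : List Nat) = List.map (· + 1) [ls.length] by simp,
            show ((m1 + 1) :: List.map (· + 1) m' = List.map (· + 1) (m1 :: m')) from rfl,
            ← List.map_append]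
          exact pair_shift ls l (m1 :: m') (m' ++ [ls.length])
    · rw [segsOf, if_neg hm, ← ih]
      simp only [pairsToSegs, marksN, hm, Bool.false_eq_true, if_false, List.nil_append]
      rw [← List.map_drop, List.length_cons,
        show ([ls.length + 1] : List Nat) = List.map (· + 1) [ls.length] by simp,
        ← List.map_append]
      exact pair_shift ls l (marksN ls) ((marksN ls).drop 1 ++ [ls.length])

theorem find_term (ls : List String) : ∀ s : Int, 0 < s →
    (PySem.List.enumerate ls s).find? (fun jl => decide (0 < jl.1) && advIsTerm jl.2)
      = (match ls.dropWhile advNotTerm with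
         | [] => none
         | t :: _ => some (s + ((ls.takeWhile advNotTerm).length : Int), t)) := by
  induction ls with
  | nil => intro s _; simp [PySem.List.enumerate_nil]
  | cons l ls ih =>
    intro s hs
    rw [PySem.List.enumerate_cons, List.find?_cons]
    by_cases ht : advIsTerm l
    · simp [ht, hs, List.dropWhile_cons, List.takeWhile_cons, advNotTerm]
    · simp only [ht, Bool.and_false, List.dropWhile_cons, List.takeWhile_cons, advNotTerm,
        Bool.not_false, if_pos, List.length_cons]
      rw [ih (s+1) (by omega)]
      cases ls.dropWhile advNotTerm with
      | nil => simp
      | cons t rest => simp; push_cast; ring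

theorem take_takeWhile (l : List String) :
    l.take (l.takeWhile advNotTerm).length = l.takeWhile advNotTerm := by
  conv_lhs => rw [← List.takeWhile_append_dropWhile (p := advNotTerm) (l := l)]
  rw [show ((l.takeWhile advNotTerm ++ l.dropWhile advNotTerm).takeWhile advNotTerm).length
        = (l.takeWhile advNotTerm).length by rw [List.takeWhile_append_dropWhile]]
  exact List.take_left

theorem stage2_fold (total : Int) : ∀ (segs : List (List String)) (acc : List String) (s : Int),
    s + segs.length = total →
    (PySem.List.enumerate segs s).foldl (fun samples ks =>
      match (PySem.List.enumerate ks.2).find? (fun jl => decide (0 < jl.1) && advIsTerm jl.2) with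
      | some jl => samples ++ [PySem.Str.join "\n" (PySem.List.slice ks.2 none (some jl.1))]
      | none => if ks.1 = total - 1 then samples ++ [PySem.Str.join "\n" ks.2] else samples) acc
      = acc ++ emitSegs segs := by
  intro segs
  induction segs with
  | nil => intro acc s _; simp [PySem.List.enumerate_nil, emitSegs]
  | cons seg rest ih =>
    intro acc s hs
    rw [PySem.List.enumerate_cons, List.foldl_cons]
    have hstep :
        (match (PySem.List.enumerate seg).find? (fun jl => decide (0 < jl.1) && advIsTerm jl.2) with
         | some jl => acc ++ [PySem.Str.join "\n" (PySem.List.slice seg none (some jl.1))]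
         | none => if s = total - 1 then acc ++ [PySem.Str.join "\n" seg] else acc)
        = acc ++ (match advTrim? seg with
           | some t => [PySem.Str.join "\n" t]
           | none => if s = total - 1 then [PySem.Str.join "\n" seg] else []) := by
      cases seg with
      | nil =>
        simp only [PySem.List.enumerate_nil, List.find?_nil, advTrim?]
        split_ifs <;> simp
      | cons h body =>
        rw [PySem.List.enumerate_cons, List.find?_cons_of_neg (by simp),
          show (0:Int)+1 = 1 from rfl, find_term body 1 one_pos]
        cases hdw : body.dropWhile advNotTerm with
        | nil =>
          simp only [advTrim?, hdw, ne_eq, not_true_eq_false, if_neg, not_false_eq_true]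
          split_ifs <;> simp
        | cons t rest' =>
          simp only [advTrim?, hdw, ne_eq, reduceCtorEq, not_false_eq_true, if_pos]
          congr 1
          rw [PySem.List.slice_to _ (by positivity)]
          rw [show ((1:Int) + ((body.takeWhile advNotTerm).length : Int)).toNat
              = 1 + (body.takeWhile advNotTerm).length by omega]
          rw [Nat.add_comm, List.take_succ_cons, take_takeWhile]
    rw [hstep]
    cases rest with
    | nil =>
      rw [PySem.List.enumerate_nil, List.foldl_nil]
      have hlast : s = total - 1 := by simp at hs; omega
      cases htr : advTrim? seg with
      | some t => simp [emitSegs, htr]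
      | none => simp [emitSegs, htr, hlast]
    | cons s2 rest' =>
      rw [ih (acc ++ _) (s+1) (by simp at hs ⊢; omega)]
      have hnot : ¬ (s = total - 1) := by simp at hs; omega
      cases htr : advTrim? seg with
      | some t => simp [emitSegs, htr, List.append_assoc]
      | none => simp [emitSegs, htr, hnot]

theorem scan_emit (n : Nat) : ∀ ls : List String, ls.length ≤ n →
    (advScan ls = emitSegs (segsOf ls)) ∧
    (∀ h bs, (∀ l ∈ bs, advIsTerm l = false) →
      advBlock (h :: bs) ls =
        emitSegs (((h :: bs) ++ ls.takeWhile advNotMark) :: segsOf (ls.dropWhile advNotMark))) := by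
  induction n with
  | zero =>
    intro ls hlen
    have : ls = [] := List.eq_nil_of_length_eq_zero (Nat.le_zero.mp hlen)
    subst this
    constructor
    · simp [advScan, segsOf, emitSegs]
    · intro h bs hbs
      have hdw : bs.dropWhile advNotTerm = [] :=
        List.dropWhile_eq_nil_iff.mpr (fun x hx => by simp [advNotTerm, hbs x hx])
      simp [advBlock, segsOf, emitSegs, advTrim?, hdw]
  | succ n ih =>
    intro ls hlen
    cases ls with
    | nil => exact ih [] (by simp)
    | cons l ls' =>
      have hlen' : ls'.length ≤ n := by simpa using hlen
      constructor
      · -- advScan (l :: ls')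
        by_cases hm : advIsMark l
        · rw [advScan, if_pos hm, segsOf, if_pos hm]
          simpa using (ih ls' hlen').2 l [] (by simp)
        · rw [advScan, if_neg hm, segsOf, if_neg hm]
          exact (ih ls' hlen').1
      · -- advBlock (h :: bs) (l :: ls')
        intro h bs hbs
        have hdwbs : bs.dropWhile advNotTerm = [] :=
          List.dropWhile_eq_nil_iff.mpr (fun x hx => by simp [advNotTerm, hbs x hx])
        by_cases hm : advIsMark l
        · rw [advBlock, if_pos hm]
          have hrec := (ih ls' hlen').2 l [] (by simp)
          simp only [List.singleton_append] at hrec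
          rw [hrec]
          -- LHS of goal: emitSegs (((h::bs) ++ []) :: segsOf (l :: ls')) with trim? (h::bs) = none
          rw [show (l :: ls').takeWhile advNotMark = [] by simp [List.takeWhile_cons, advNotMark, hm],
            show (l :: ls').dropWhile advNotMark = l :: ls' by simp [List.dropWhile_cons, advNotMark, hm],
            show segsOf (l :: ls') = (l :: ls'.takeWhile advNotMark) :: segsOf (ls'.dropWhile advNotMark) by rw [segsOf, if_pos hm]]
          simp [emitSegs, advTrim?, hdwbs]
        · by_cases ht : advIsTerm l
          · rw [advBlock, if_neg hm, if_pos ht, (ih ls' hlen').1, ← segsOf_dropWhile ls']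
            rw [show (l :: ls').takeWhile advNotMark = l :: ls'.takeWhile advNotMark by
                  simp [List.takeWhile_cons, advNotMark, hm],
              show (l :: ls').dropWhile advNotMark = ls'.dropWhile advNotMark by
                  simp [List.dropWhile_cons, advNotMark, hm]]
            have hall : ∀ x ∈ bs, advNotTerm x = true := fun x hx => by
              simp [advNotTerm, hbs x hx]
            have htrim : advTrim? (h :: (bs ++ l :: ls'.takeWhile advNotMark)) = some (h :: bs) := by
              rw [advTrim?]
              rw [List.dropWhile_append_of_pos hall, List.takeWhile_append_of_pos hall]
              simp [List.dropWhile_cons, List.takeWhile_cons, advNotTerm, ht]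
            cases hsg : segsOf (ls'.dropWhile advNotMark) with
            | nil => simp [emitSegs, htrim]
            | cons S2 rest => simp [emitSegs, htrim]
          · rw [advBlock, if_neg hm, if_neg ht]
            have hrec := (ih ls' hlen').2 h (bs ++ [l]) (by
              intro x hx
              rcases List.mem_append.mp hx with hx | hx
              · exact hbs x hx
              · simp at hx; subst hx; simpa using ht)
            rw [List.cons_append, hrec]
            rw [show (l :: ls').takeWhile advNotMark = l :: ls'.takeWhile advNotMark by
                  simp [List.takeWhile_cons, advNotMark, hm],
              show (l :: ls').dropWhile advNotMark = ls'.dropWhile advNotMark by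
                  simp [List.dropWhile_cons, advNotMark, hm]]
            simp

-- B's Int-indexed marks/zip/slice pipeline computes the Nat-indexed pairsToSegs
theorem segs_cast (ls : List String) (m : List Nat) :
    (((List.map (fun (k : Nat) => (k : Int)) m).zip
        ((List.map (fun (k : Nat) => (k : Int)) m).drop 1 ++ [(ls.length : Int)])).map
        (fun ab => PySem.List.slice ls (some ab.1) (some ab.2))) = pairsToSegs ls m := by
  rw [← List.map_drop,
    show ([(ls.length : Int)] : List Int) = List.map (fun (k : Nat) => (k : Int)) [ls.length] by simp,
    ← List.map_append, List.zip_map, List.map_map]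
  apply List.map_congr_left
  intro ab _
  simp [Function.comp, Prod.map, PySem.List.slice_natCast, pairSeg]

-- ===== VERDICT (by name: the statement is the Claim_ definition above) =====
theorem analyze_duplication_spec : Claim_equal_analyze_duplication := by
  intro output _
  unfold Spec_analyze_duplication analyze_duplication analyze_duplication_alt
  set lines := (PySem.Str.split? output "\n").getD [] with hl
  have hsegs : advSegments lines = segsOf lines := by
    have hmarks :
        (PySem.List.enumerate lines).filterMap (fun p => if advIsMark p.2 = true then some p.1 else none)
          = List.map (fun (k : Nat) => (k : Int)) (marksN lines) := by
      rw [marks_enum lines 0]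
      exact List.map_congr_left (fun k _ => by ring)
    simp only [advSegments, hmarks]
    rw [segs_cast lines (marksN lines), pairs_eq lines]
  have hcol : advCollect (segsOf lines) = emitSegs (segsOf lines) := by
    simp only [advCollect]
    exact stage2_fold (((segsOf lines).length : Int)) (segsOf lines) [] 0 (by simp)
  have hA : advFin (lines.foldl advStepA (false, [], [])) = advScan lines := by
    simpa using (adv_key lines).1 []
  show advFin (lines.foldl advStepA (false, [], [])) = advCollect (advSegments lines)
  rw [hsegs, hcol, hA]
  exact (scan_emit lines.length lines le_rfl).1
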